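-- pv_equiv track=rewrite | github.com/jay323p/lottery_python | numbers_game.py | didMatchFirstThreeAny
-- ===== SOURCE A (Python) =====
-- def didMatchFirstThreeAny(numsChosen, winNums):
--     usr_freq = {}
--     win_freq = {}
--     for i in range(3):
--         if (numsChosen[i] in usr_freq):
--             usr_freq[numsChosen[i]] += 1
--         else:
--             usr_freq[numsChosen[i]] = 1
--     for i in range(3):
--         if (winNums[i] in win_freq):
--             win_freq[winNums[i]] += 1
--         else:
--             win_freq[winNums[i]] = 1
--     return usr_freq == win_freq
-- ===== SOURCE B (Python) =====
-- def didMatchFirstThreeAny(numsChosen, winNums):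
--     return sorted([numsChosen[0], numsChosen[1], numsChosen[2]]) == \
--            sorted([winNums[0], winNums[1], winNums[2]])
-- ===== Notes on version B (the rewrite author's own statement) =====
-- stated objective: simpler
-- what changed: Replaces the two hand-built frequency dicts and dict comparison with a direct comparison of the sorted triples of the first three elements (multiset equality by sorting instead of counting).
import Mathlib
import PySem

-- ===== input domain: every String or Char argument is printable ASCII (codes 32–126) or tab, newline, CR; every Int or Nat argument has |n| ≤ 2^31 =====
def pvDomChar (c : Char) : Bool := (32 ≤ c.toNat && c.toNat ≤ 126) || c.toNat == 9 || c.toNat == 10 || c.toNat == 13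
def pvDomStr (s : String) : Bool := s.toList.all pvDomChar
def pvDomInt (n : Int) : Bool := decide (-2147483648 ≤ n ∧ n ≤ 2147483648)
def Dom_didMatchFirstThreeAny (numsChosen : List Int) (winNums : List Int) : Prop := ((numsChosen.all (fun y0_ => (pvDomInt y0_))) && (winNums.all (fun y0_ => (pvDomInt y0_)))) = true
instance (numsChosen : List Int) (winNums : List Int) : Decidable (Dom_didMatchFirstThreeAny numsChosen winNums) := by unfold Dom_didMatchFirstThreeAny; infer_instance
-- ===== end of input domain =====

-- B compares the sorted triples of the first three elements instead of building and
-- comparing two frequency dicts (objective: simpler).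

-- ===== PORT A =====
-- Python dict ==: equal iff the two dicts define the same key→value mapping (order ignored)
def pyDictEq (d1 d2 : PySem.Dict Int Int) : Bool :=
  d1.items.all (fun p => d2.get? p.1 == some p.2) &&
  d2.items.all (fun p => d1.get? p.1 == some p.2)

def didMatchFirstThreeAny (numsChosen : List Int) (winNums : List Int) : Bool :=
  let usr_freq :=
    (PySem.List.pyRange 0 3 1).foldl (fun d i =>
      let x := PySem.List.pyGetD numsChosen i 0
      if d.contains x then d.insert x (d.getD x 0 + 1) else d.insert x 1)
      PySem.Dict.empty
  let win_freq :=
    (PySem.List.pyRange 0 3 1).foldl (fun d i =>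
      let x := PySem.List.pyGetD winNums i 0
      if d.contains x then d.insert x (d.getD x 0 + 1) else d.insert x 1)
      PySem.Dict.empty
  pyDictEq usr_freq win_freq

-- ===== PORT B =====
def didMatchFirstThreeAny_alt (numsChosen : List Int) (winNums : List Int) : Bool :=
  PySem.List.sorted [PySem.List.pyGetD numsChosen 0 0, PySem.List.pyGetD numsChosen 1 0,
      PySem.List.pyGetD numsChosen 2 0] (fun x => x) false
    == PySem.List.sorted [PySem.List.pyGetD winNums 0 0, PySem.List.pyGetD winNums 1 0,
      PySem.List.pyGetD winNums 2 0] (fun x => x) false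

-- ===== PRECONDITION & SPEC =====
-- A indexes both lists at 0,1,2 and raises IndexError when either is shorter than 3.
def Pre_didMatchFirstThreeAny (numsChosen : List Int) (winNums : List Int) : Prop :=
  3 ≤ numsChosen.length ∧ 3 ≤ winNums.length
instance (numsChosen : List Int) (winNums : List Int) : Decidable (Pre_didMatchFirstThreeAny numsChosen winNums) := by unfold Pre_didMatchFirstThreeAny; infer_instance

def pvWitness_didMatchFirstThreeAny : List Int × List Int := ([3, 1, 2], [2, 3, 1])

def Spec_didMatchFirstThreeAny (numsChosen : List Int) (winNums : List Int) (out : Bool) : Prop := out = didMatchFirstThreeAny_alt numsChosen winNums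
instance (numsChosen : List Int) (winNums : List Int) (out : Bool) : Decidable (Spec_didMatchFirstThreeAny numsChosen winNums out) := by unfold Spec_didMatchFirstThreeAny; infer_instance

-- ===== CLAIM (what is proved, stated in full; the proofs are below) =====
def Claim_equal_didMatchFirstThreeAny : Prop := ∀ (numsChosen : List Int) (winNums : List Int), Dom_didMatchFirstThreeAny numsChosen winNums → Pre_didMatchFirstThreeAny numsChosen winNums → Spec_didMatchFirstThreeAny numsChosen winNums (didMatchFirstThreeAny numsChosen winNums)

-- ===== LEMMAS AND PROOFS =====

theorem freq_step_eq (d : PySem.Dict Int Int) (x : Int) :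
    (if d.contains x then d.insert x (d.getD x 0 + 1) else d.insert x 1) =
      d.insert x (d.getD x 0 + 1) := by
  by_cases h : d.contains x = true
  · simp [h]
  · simp only [Bool.not_eq_true] at h
    simp [h, PySem.Dict.getD_of_not_contains d 0 h]

theorem get?_counter (xs : List Int) (k : Int) :
    (PySem.Dict.counter xs).get? k = if k ∈ xs then some ((xs.count k : Int)) else none := by
  by_cases h : k ∈ xs
  · rw [if_pos h]
    apply PySem.Dict.get?_of_mem_items
    · rw [PySem.Dict.items_counter]
      exact List.mem_map.mpr ⟨k, (PySem.Set.mem_ofList _ _).mpr h, rfl⟩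
    · exact PySem.Dict.nodup_keys_counter xs
  · rw [if_neg h]
    rw [PySem.Dict.get?_eq_none_iff_contains, PySem.Dict.contains_counter]
    simpa using h

theorem pyDictEq_counter_iff (xs ys : List Int) :
    pyDictEq (PySem.Dict.counter xs) (PySem.Dict.counter ys) = true ↔ xs.Perm ys := by
  rw [List.perm_iff_count]
  unfold pyDictEq
  simp only [Bool.and_eq_true, List.all_eq_true, PySem.Dict.items_counter, List.mem_map,
    beq_iff_eq, get?_counter]
  constructor
  · rintro ⟨h1, h2⟩ k
    by_cases hx : k ∈ xs
    · have := h1 (k, (xs.count k : Int)) ⟨k, (PySem.Set.mem_ofList _ _).mpr hx, rfl⟩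
      by_cases hy : k ∈ ys
      · rw [if_pos hy] at this
        simp only at this
        exact_mod_cast (Option.some.inj this).symm
      · rw [if_neg hy] at this; cases this
    · by_cases hy : k ∈ ys
      · have := h2 (k, (ys.count k : Int)) ⟨k, (PySem.Set.mem_ofList _ _).mpr hy, rfl⟩
        rw [if_neg hx] at this; cases this
      · rw [List.count_eq_zero_of_not_mem hx, List.count_eq_zero_of_not_mem hy]
  · intro h
    constructor
    · rintro p ⟨k, hk, rfl⟩
      have hx : k ∈ xs := (PySem.Set.mem_ofList _ _).mp hk
      have hy : k ∈ ys := (List.count_pos_iff).mp (by rw [← h k]; exact List.count_pos_iff.mpr hx)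
      rw [if_pos hy, h k]
    · rintro p ⟨k, hk, rfl⟩
      have hy : k ∈ ys := (PySem.Set.mem_ofList _ _).mp hk
      have hx : k ∈ xs := (List.count_pos_iff).mp (by rw [h k]; exact List.count_pos_iff.mpr hy)
      rw [if_pos hx, h k]

-- the loop of A over a ≥3-element list builds Counter of its first three elements
theorem freq_loop_eq_counter (a b c : Int) (r : List Int) :
    (PySem.List.pyRange 0 3 1).foldl (fun d i =>
      let x := PySem.List.pyGetD (a :: b :: c :: r) i 0
      if d.contains x then d.insert x (d.getD x 0 + 1) else d.insert x 1)
      PySem.Dict.empty = PySem.Dict.counter [a, b, c] := by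
  have hr : PySem.List.pyRange 0 3 1 = [0, 1, 2] := by decide
  rw [hr]
  simp only [List.foldl]
  have ga : PySem.List.pyGetD (a :: b :: c :: r) 0 0 = a := by
    simp [PySem.List.pyGetD_ofNat', List.getD]
  have g0 : PySem.List.pyGetD (a :: b :: c :: r) 1 0 = b := by
    simp [PySem.List.pyGetD_ofNat', List.getD]
  have g1 : PySem.List.pyGetD (a :: b :: c :: r) 2 0 = c := by
    simp [PySem.List.pyGetD_ofNat', List.getD]
  rw [ga, g0, g1, freq_step_eq, freq_step_eq, freq_step_eq,
    ← PySem.Dict.foldl_insert_getD_add_one_eq_counter]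
  rfl

-- ===== VERDICT (by name: the statement is the Claim_ definition above) =====
theorem didMatchFirstThreeAny_spec : Claim_equal_didMatchFirstThreeAny := by
  intro numsChosen winNums _ hpre
  obtain ⟨h1, h2⟩ := hpre
  obtain ⟨a, b, c, r, rfl⟩ : ∃ a b c r, numsChosen = a :: b :: c :: r := by
    match numsChosen, h1 with
    | x :: y :: z :: t, _ => exact ⟨x, y, z, t, rfl⟩
  obtain ⟨d, e, f, s, rfl⟩ : ∃ d e f s, winNums = d :: e :: f :: s := by
    match winNums, h2 with
    | x :: y :: z :: t, _ => exact ⟨x, y, z, t, rfl⟩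
  show didMatchFirstThreeAny _ _ = didMatchFirstThreeAny_alt _ _
  unfold didMatchFirstThreeAny didMatchFirstThreeAny_alt
  simp only [freq_loop_eq_counter]
  have hA : pyDictEq (PySem.Dict.counter [a, b, c]) (PySem.Dict.counter [d, e, f]) =
      decide (([a, b, c] : List Int).Perm [d, e, f]) := by
    by_cases h : ([a, b, c] : List Int).Perm [d, e, f]
    · simp [h, (pyDictEq_counter_iff _ _).mpr h]
    · simp only [h, decide_false]
      by_contra hne
      exact h ((pyDictEq_counter_iff _ _).mp (by revert hne; cases pyDictEq (PySem.Dict.counter [a, b, c]) (PySem.Dict.counter [d, e, f]) <;> simp))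
  have gB : ∀ (x y z : Int) (t : List Int),
      [PySem.List.pyGetD (x :: y :: z :: t) 0 0, PySem.List.pyGetD (x :: y :: z :: t) 1 0,
        PySem.List.pyGetD (x :: y :: z :: t) 2 0] = [x, y, z] := by
    intro x y z t; simp [PySem.List.pyGetD_ofNat', List.getD]
  rw [hA, gB, gB]
  by_cases h : ([a, b, c] : List Int).Perm [d, e, f]
  · simp [h, (PySem.List.sorted_id_eq_sorted_id_iff_perm _ _).mpr h]
  · simp only [h, decide_false, eq_comm (a := false), beq_eq_false_iff_ne, ne_eq]
    exact fun he => h ((PySem.List.sorted_id_eq_sorted_id_iff_perm _ _).mp he)
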